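-- pv_equiv track=rewrite | github.com/meshcore-dev/MeshCore | tools/generate_font_glyphs.py | columns_to_bytes
-- ===== SOURCE A (Python) =====
-- def columns_to_bytes(columns, target_height):
--     """Convert column pixel data to OLEDDisplay packed bytes."""
--     raster_height = (target_height + 7) // 8
--     result = []
--     for col in columns:
--         for seg in range(raster_height):
--             byte_val = 0
--             for bit in range(8):
--                 py = seg * 8 + bit
--                 if py < len(col) and col[py]:
--                     byte_val |= (1 << bit)
--             result.append(byte_val)
--     return result
-- ===== SOURCE B (Python) =====
-- def columns_to_bytes(columns, target_height):
--     """Convert column pixel data to OLEDDisplay packed bytes."""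
--     raster_height = (target_height + 7) // 8
--     result = []
--     for col in columns:
--         # Pack the whole column into ONE big integer (bit py set iff pixel py is on),
--         # then peel off raster_height bytes with shift-and-mask.
--         n = 0
--         for py, px in enumerate(col[:raster_height * 8]):
--             if px:
--                 n |= 1 << py
--         for seg in range(raster_height):
--             result.append((n >> (seg * 8)) & 0xFF)
--     return result
-- ===== Notes on version B (the rewrite author's own statement) =====
-- stated objective: alternative
-- what changed: A gathers each output byte with nested per-segment/per-bit loops doing a bounds test per bit; B first packs each whole column into a single big integer (bit py set iff pixel py is on), then extracts the raster_height output bytes from it by shift-and-mask, so no per-bit bounds arithmetic remains.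
import Mathlib
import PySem

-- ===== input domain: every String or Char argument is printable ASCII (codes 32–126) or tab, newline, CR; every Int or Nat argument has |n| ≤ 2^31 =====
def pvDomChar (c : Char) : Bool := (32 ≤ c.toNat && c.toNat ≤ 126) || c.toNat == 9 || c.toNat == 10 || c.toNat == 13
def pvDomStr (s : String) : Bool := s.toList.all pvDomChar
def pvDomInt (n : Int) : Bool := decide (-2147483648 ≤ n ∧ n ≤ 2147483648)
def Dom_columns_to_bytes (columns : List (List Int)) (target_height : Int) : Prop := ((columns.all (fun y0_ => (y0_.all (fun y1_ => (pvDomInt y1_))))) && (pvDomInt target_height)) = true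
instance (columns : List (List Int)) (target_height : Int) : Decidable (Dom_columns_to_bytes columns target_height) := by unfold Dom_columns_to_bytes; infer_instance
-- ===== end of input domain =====

-- B replaces A's nested per-segment/per-bit byte gathering by packing each whole column
-- into one big integer (bit py set iff pixel py is on) and then extracting the
-- raster_height output bytes by shift-and-mask (objective: alternative decomposition).

-- ===== PORT A =====
-- Literal transliteration of A: for each column, for seg in range(raster_height),
-- gather 8 bits; col[py] is read as col.getD py.toNat 0 — exact since py = seg*8+bit ≥ 0
-- and it is only read under py < len(col).
def columns_to_bytes (columns : List (List Int)) (target_height : Int) : List Int :=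
  let raster_height := PySem.Int.floordiv (target_height + 7) 8
  columns.foldl (fun result col =>
    (PySem.List.pyRange 0 raster_height 1).foldl (fun result seg =>
      result ++ [(List.range 8).foldl (fun byte_val bit =>
        let py : Int := seg * 8 + (bit : Int)
        if py < (col.length : Int) ∧ col.getD py.toNat 0 ≠ 0 then
          PySem.Int.bor byte_val ((1 : Int) <<< bit)
        else byte_val) 0]) result) []

-- ===== PORT B =====
-- Literal transliteration of Source B: col[:raster_height*8] is PySem.List.slice;
-- enumerate is PySem.List.enumerate (its index py is ≥ 0, so 1 << py is 1 <<< py.toNat,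
-- and n >> seg*8 with seg ≥ 0 is n >>> (seg*8).toNat — exact on those indices).
def columns_to_bytes_alt (columns : List (List Int)) (target_height : Int) : List Int :=
  let raster_height := PySem.Int.floordiv (target_height + 7) 8
  columns.foldl (fun result col =>
    let n : Int := (PySem.List.enumerate (PySem.List.slice col none (some (raster_height * 8)))).foldl
      (fun (n : Int) (p : Int × Int) => if p.2 ≠ 0 then PySem.Int.bor n ((1 : Int) <<< p.1.toNat) else n) 0
    (PySem.List.pyRange 0 raster_height 1).foldl
      (fun result seg => result ++ [PySem.Int.band (n >>> (seg * 8).toNat) 255]) result) []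

-- ===== PRECONDITION & SPEC =====
def Spec_columns_to_bytes (columns : List (List Int)) (target_height : Int) (out : List Int) : Prop := out = columns_to_bytes_alt columns target_height
instance (columns : List (List Int)) (target_height : Int) (out : List Int) : Decidable (Spec_columns_to_bytes columns target_height out) := by unfold Spec_columns_to_bytes; infer_instance

-- ===== CLAIM (what is proved, stated in full; the proofs are below) =====
def Claim_equal_columns_to_bytes : Prop := ∀ (columns : List (List Int)) (target_height : Int), Dom_columns_to_bytes columns target_height → Spec_columns_to_bytes columns target_height (columns_to_bytes columns target_height)

-- ===== LEMMAS AND PROOFS =====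

theorem testBit_one (i : Nat) : (1 : Nat).testBit i = decide (i = 0) := by
  cases i with
  | zero => decide
  | succ k => simp [Nat.testBit_succ]

theorem testBit_one_shiftLeft (x j : Nat) : ((1 <<< x : Nat)).testBit j = decide (j = x) := by
  rw [Nat.testBit_shiftLeft, testBit_one]
  by_cases h2 : j = x
  · subst h2; simp
  · by_cases h : x ≤ j
    · simp [h, h2, show j - x ≠ 0 by omega]
    · simp [h, h2]

theorem one_shiftLeft_int (k : Nat) : (1 : Int) <<< k = ((1 <<< k : Nat) : Int) := by
  simp [Int.shiftLeft_eq, Nat.shiftLeft_eq]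

-- testBit of an or-accumulating fold over a list of exponents
theorem testBit_foldl_or (l : List Nat) (p : Nat → Prop) [DecidablePred p] (a j : Nat) :
    ((l.foldl (fun v i => if p i then v ||| (1 <<< i) else v) a).testBit j)
      = (a.testBit j || (decide (j ∈ l) && decide (p j))) := by
  induction l generalizing a with
  | nil => simp
  | cons x xs ih =>
    rw [List.foldl_cons, ih]
    by_cases hp : p x
    · simp only [if_pos hp, Nat.testBit_or, testBit_one_shiftLeft]
      by_cases hj : j = x
      · subst hj; simp [hp]
      · simp [hj]
    · rw [if_neg hp]
      by_cases hj : j = x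
      · subst hj; simp [hp]
      · simp [hj]

-- the Int fold is the cast of the same fold on Nat
theorem intfold_eq_natfold (l : List Nat) (p : Nat → Prop) [DecidablePred p] (a : Nat) :
    (l.foldl (fun v i => if p i then PySem.Int.bor v ((1 : Int) <<< i) else v) (a : Int))
      = ((l.foldl (fun v i => if p i then v ||| (1 <<< i) else v) a : Nat) : Int) := by
  induction l generalizing a with
  | nil => rfl
  | cons x xs ih =>
    rw [List.foldl_cons, List.foldl_cons]
    by_cases hp : p x
    · rw [if_pos hp, if_pos hp, one_shiftLeft_int, PySem.Int.bor_natCast, ih]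
    · rw [if_neg hp, if_neg hp, ih]

-- the big integer B packs for a column clipped to cs = col[:rh*8]
def packBits (cs : List Int) : Nat :=
  (List.range cs.length).foldl (fun v j => if cs.getD j 0 ≠ 0 then v ||| (1 <<< j) else v) 0

theorem testBit_packBits (cs : List Int) (j : Nat) :
    (packBits cs).testBit j = (decide (j < cs.length) && decide (cs.getD j 0 ≠ 0)) := by
  unfold packBits
  rw [testBit_foldl_or]
  simp

-- A's byte for segment s, as a Nat fold
def gByte (col : List Int) (s : Nat) : Nat :=
  (List.range 8).foldl (fun v bit =>
    if 8 * s + bit < col.length ∧ col.getD (8 * s + bit) 0 ≠ 0 then v ||| (1 <<< bit) else v) 0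

theorem testBit_gByte (col : List Int) (s j : Nat) :
    (gByte col s).testBit j
      = (decide (j < 8) && decide (8 * s + j < col.length ∧ col.getD (8 * s + j) 0 ≠ 0)) := by
  unfold gByte
  rw [testBit_foldl_or (p := fun bit => 8 * s + bit < col.length ∧ col.getD (8 * s + bit) 0 ≠ 0)]
  simp

-- key per-segment identity: gathering 8 bits = shift-and-mask of the packed integer
theorem gByte_eq_shift_mask (col : List Int) (m s : Nat) (hs : s < m) :
    gByte col s = ((packBits (col.take (m * 8))) >>> (8 * s)) &&& (255 : Nat) := by
  apply Nat.eq_of_testBit_eq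
  intro j
  rw [Nat.testBit_and, Nat.testBit_shiftRight, testBit_packBits, testBit_gByte,
    show (255 : Nat) = 2 ^ 8 - 1 from rfl, Nat.testBit_two_pow_sub_one]
  have hlen : (col.take (m * 8)).length = min (m * 8) col.length := List.length_take
  by_cases hj : j < 8
  · have hlt : 8 * s + j < m * 8 := by omega
    by_cases hc : 8 * s + j < col.length
    · have hget : (col.take (m * 8)).getD (8 * s + j) 0 = col.getD (8 * s + j) 0 := by
        rw [List.getD_eq_getElem?_getD, List.getD_eq_getElem?_getD, List.getElem?_take_of_lt hlt]
      rw [hget]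
      simp [hj, hc, hlt]
    · have hnot : ¬ (8 * s + j < (col.take (m * 8)).length) := by omega
      simp [hj, hc]
  · simp [hj]

-- B's Int fold over the enumeration of cs computes the cast of packBits cs
theorem n_eq_packBits (cs : List Int) :
    ((PySem.List.enumerate cs).foldl
      (fun (n : Int) (p : Int × Int) => if p.2 ≠ 0 then PySem.Int.bor n ((1 : Int) <<< p.1.toNat) else n) (0 : Int))
      = ((packBits cs : Nat) : Int) := by
  unfold packBits
  rw [PySem.List.enumerate_eq_map_pyRange cs 0, List.foldl_map, PySem.List.pyRange_one,
    List.foldl_map, PySem.List.len_eq,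
    show (((cs.length : Int)) - 0).toNat = cs.length by omega]
  calc ((List.range cs.length).foldl (fun (v : Int) (j : Nat) =>
          if PySem.List.pyGetD cs ((0 : Int) + (j : Int)) 0 ≠ 0 then
            PySem.Int.bor v ((1 : Int) <<< ((0 : Int) + (j : Int)).toNat) else v) 0)
      = ((List.range cs.length).foldl (fun (v : Int) (j : Nat) =>
          if cs.getD j 0 ≠ 0 then PySem.Int.bor v ((1 : Int) <<< j) else v) 0) := by
        apply List.foldl_ext
        intro v j _
        have h0 : ((0 : Int) + (j : Int)) = (j : Int) := by ring
        simp only [h0, PySem.List.pyGetD_natCast, Int.toNat_natCast]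
    _ = _ := intfold_eq_natfold (List.range cs.length) (fun j => cs.getD j 0 ≠ 0) 0

-- A's Int byte fold at seg = 0 + s equals the cast of gByte
theorem byteA_eq (col : List Int) (s : Nat) :
    ((List.range 8).foldl (fun (byte_val : Int) (bit : Nat) =>
        if ((0 : Int) + (s : Int)) * 8 + (bit : Int) < (col.length : Int)
            ∧ col.getD (((0 : Int) + (s : Int)) * 8 + (bit : Int)).toNat 0 ≠ 0 then
          PySem.Int.bor byte_val ((1 : Int) <<< bit)
        else byte_val) 0)
      = ((gByte col s : Nat) : Int) := by
  unfold gByte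
  calc ((List.range 8).foldl (fun (byte_val : Int) (bit : Nat) =>
        if ((0 : Int) + (s : Int)) * 8 + (bit : Int) < (col.length : Int)
            ∧ col.getD (((0 : Int) + (s : Int)) * 8 + (bit : Int)).toNat 0 ≠ 0 then
          PySem.Int.bor byte_val ((1 : Int) <<< bit)
        else byte_val) 0)
      = ((List.range 8).foldl (fun (v : Int) (bit : Nat) =>
          if 8 * s + bit < col.length ∧ col.getD (8 * s + bit) 0 ≠ 0 then
            PySem.Int.bor v ((1 : Int) <<< bit) else v) 0) := by
        apply List.foldl_ext
        intro v bit _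
        have h1 : (((0 : Int) + (s : Int)) * 8 + (bit : Int)).toNat = 8 * s + bit := by omega
        have h2 : (((0 : Int) + (s : Int)) * 8 + (bit : Int) < (col.length : Int))
            ↔ (8 * s + bit < col.length) := by omega
        rw [h1]
        simp only [h2]
    _ = _ := intfold_eq_natfold (List.range 8)
          (fun bit => 8 * s + bit < col.length ∧ col.getD (8 * s + bit) 0 ≠ 0) 0

-- per-column equality of the two loop bodies (n written zeta-reduced)
theorem percol_eq (col : List Int) (rh : Int) (result : List Int) :
    (PySem.List.pyRange 0 rh 1).foldl (fun result seg =>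
      result ++ [(List.range 8).foldl (fun byte_val (bit : Nat) =>
        if seg * 8 + (bit : Int) < (col.length : Int)
            ∧ col.getD (seg * 8 + (bit : Int)).toNat 0 ≠ 0 then
          PySem.Int.bor byte_val ((1 : Int) <<< bit)
        else byte_val) 0]) result
    = (PySem.List.pyRange 0 rh 1).foldl
        (fun result seg => result ++
          [PySem.Int.band
            (((PySem.List.enumerate (PySem.List.slice col none (some (rh * 8)))).foldl
                (fun (n : Int) (p : Int × Int) =>
                  if p.2 ≠ 0 then PySem.Int.bor n ((1 : Int) <<< p.1.toNat) else n) 0)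
              >>> (seg * 8).toNat) 255]) result := by
  rw [PySem.List.pyRange_one, List.foldl_map, List.foldl_map,
    PySem.List.foldl_append_singleton_eq_map, PySem.List.foldl_append_singleton_eq_map]
  congr 1
  apply List.map_congr_left
  intro s hs
  have hsm : s < (rh - 0).toNat := List.mem_range.mp hs
  have hrh : 0 < rh := by omega
  have hslice : PySem.List.slice col none (some (rh * 8)) = col.take ((rh - 0).toNat * 8) := by
    rw [PySem.List.slice_to col (by omega)]
    congr 1
    omega
  rw [hslice, n_eq_packBits, byteA_eq col s,
    gByte_eq_shift_mask col ((rh - 0).toNat) s hsm]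
  rw [show (((0 : Int) + (s : Int)) * 8).toNat = 8 * s by omega, Int.shiftRight_natCast,
    show (255 : Int) = ((255 : Nat) : Int) from rfl, PySem.Int.band_natCast]

-- ===== VERDICT (by name: the statement is the Claim_ definition above) =====
theorem columns_to_bytes_spec : Claim_equal_columns_to_bytes := by
  intro columns target_height _
  unfold Spec_columns_to_bytes columns_to_bytes columns_to_bytes_alt
  apply List.foldl_ext
  intro result col _
  exact percol_eq col (PySem.Int.floordiv (target_height + 7) 8) result
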